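-- pv_equiv track=rewrite | github.com/GlaciEnora/Cryptography-Lab | Aes/galois.py | invsbox
-- ===== SOURCE A (Python) =====
-- def gf_degree(a) :
--  res = 0
--  a >>= 1
--  while (a != 0) :
--    a >>= 1
--    res += 1
--  return res
--
-- def gf_invert(a, mod=0x1B) :
--  v = mod
--  g1 = 1
--  g2 = 0
--  j = gf_degree(a) - 8
--
--  while (a != 1) :
--    if (j < 0) :
--      a, v = v, a
--      g1, g2 = g2, g1
--      j = -j
--
--    a ^= v << j
--    g1 ^= g2 << j
--
--    a %= 256  # Emulating 8-bit overflow
--    g1 %= 256 # Emulating 8-bit overflow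
--
--    j = gf_degree(a) - gf_degree(v)
--
--  return g1
--
-- def truxor(ran):
--   ran = bin(ran).replace("0b", "")
--   if len(ran) < 8: ran = ("0"*(8-len(ran)))+ran
--   s = 0
--   for i in range(8):
--        s ^= int(ran[-1])
--        ran = ran[:-1]
--   return s
--
-- def shift(key):
--    if key & 0x01:
--       key >>= 1
--       key ^= 0x80
--       return key
--    else:
--       return key>>1
--
-- def invsbox(b):
--   k = hex(b)
--   if len(k) == 3:
--       k = k[:2] + "0" + k[-1]
--   y = k[-1]
--   x = k[-2]
--   b = int(y + x, 16)
--   bytebox = 0b00100101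
--   cons = 0x05
--   s = ""
--   for i in range(8):
--       s = str(truxor(bytebox & b)) + s
--       bytebox = shift(bytebox)
--   temp = (int(s[::-1], 2) ^ cons)
--   return gf_invert(temp)
-- ===== SOURCE B (Python) =====
-- def gf_mul(x, y):
--     # carry-less multiply mod the AES polynomial x^8+x^4+x^3+x+1
--     r = 0
--     while y:
--         if y & 1:
--             r ^= x
--         x <<= 1
--         if x & 0x100:
--             x ^= 0x11B
--         y >>= 1
--     return r
--
-- def gf_inv(t):
--     # t^254 in GF(2^8) by square-and-multiply (the multiplicative inverse for t != 0)
--     r = t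
--     for _ in range(6):
--         r = gf_mul(gf_mul(r, r), t)
--     return gf_mul(r, r)
--
-- def invsbox(b):
--     # The hex-string slicing of A selects the last two hex digits of |b| and swaps
--     # the nibbles; the rotating 0x25 mask + parity loop + reversal compose to the
--     # linear map rol(c,1) ^ rol(c,3) ^ rol(c,6) on the un-swapped byte c = |b| % 256,
--     # followed by ^ 0x05; the GF(2^8) inverse is then taken by Fermat exponentiation.
--     c = abs(b) % 256
--     t = ((((c << 1) | (c >> 7)) ^ ((c << 3) | (c >> 5)) ^ ((c << 6) | (c >> 2))) & 0xFF) ^ 0x05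
--     return gf_inv(t)
-- ===== Notes on version B (the rewrite author's own statement) =====
-- stated objective: alternative
-- what changed: invsbox's hex-string slicing, nibble-swap via string indexing, rotating-mask parity loop (truxor/shift), string reversal and extended-Euclid gf_invert are all replaced: B reduces the input to its low byte abs(b) % 256, applies the equivalent affine map rol(c,1)^rol(c,3)^rol(c,6)^0x05 in closed-form bit arithmetic, and inverts in GF(2^8) by Fermat exponentiation t^254 via square-and-multiply (gf_mul/gf_inv), sharing no code with A.
import Mathlib
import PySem

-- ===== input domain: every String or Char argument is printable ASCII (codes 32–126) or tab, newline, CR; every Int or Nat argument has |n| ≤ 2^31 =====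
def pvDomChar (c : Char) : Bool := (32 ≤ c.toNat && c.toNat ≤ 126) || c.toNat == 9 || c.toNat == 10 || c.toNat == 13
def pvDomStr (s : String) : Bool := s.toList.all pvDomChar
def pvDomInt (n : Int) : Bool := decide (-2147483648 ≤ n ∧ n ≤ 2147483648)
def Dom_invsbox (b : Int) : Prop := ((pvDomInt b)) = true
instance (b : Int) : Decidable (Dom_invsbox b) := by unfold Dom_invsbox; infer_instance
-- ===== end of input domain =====

-- B replaces invsbox's hex/binary string manipulation, rotating-mask parity loop and
-- extended-Euclid gf_invert by a closed-form affine map on the byte |b| % 256 followed by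
-- a GF(2^8) Fermat inverse t^254 computed by square-and-multiply (objective: alternative).

-- ===== PORT A =====

-- `gf_degree`'s while loop; the fuel (64) only makes the recursion total: on the
-- nonnegative arguments reached inside Pre_ the loop runs at most bit_length(a) ≤ 8 times.
def gfDegreeGo : Nat → Int → Int → Int
  | 0, _, res => res
  | f+1, a, res =>
    if a ≠ 0 then gfDegreeGo f (PySem.Int.floordiv a 2) (res + 1) else res

def gfDegree (a : Int) : Int := gfDegreeGo 64 (PySem.Int.floordiv a 2) 0

-- `gf_invert`'s while loop over (a, v, g1, g2, j).  `v << j` is evaluated after the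
-- sign fix, so j ≥ 0 there and `v * 2 ^ j.toNat` is exact.  The fuel (64) only makes
-- the recursion total: inside Pre_ the loop runs at most 12 times.
def gfInvertGo : Nat → Int → Int → Int → Int → Int → Int
  | 0, _, _, g1, _, _ => g1
  | f+1, a, v, g1, g2, j =>
    if a ≠ 1 then
      let a' := if j < 0 then v else a
      let v' := if j < 0 then a else v
      let g1' := if j < 0 then g2 else g1
      let g2' := if j < 0 then g1 else g2
      let j' := if j < 0 then -j else j
      let a2 := PySem.Int.mod (PySem.Int.bxor a' (v' * 2 ^ j'.toNat)) 256
      let g12 := PySem.Int.mod (PySem.Int.bxor g1' (g2' * 2 ^ j'.toNat)) 256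
      gfInvertGo f a2 v' g12 g2' (gfDegree a2 - gfDegree v')
    else g1

def gfInvert (a : Int) (mod : Int) : Int :=
  gfInvertGo 64 a mod 1 0 (gfDegree a - 8)

-- digits of `bin(n)` for n ≥ 0 (`bin(0)` = "0b0" → ['0']); every value truxor receives
-- from invsbox is nonnegative.
-- (structural fuel n+1 always suffices: n / 2 < n)
def binDigitsGo : Nat → Nat → List Char
  | 0, _ => []
  | f+1, n =>
    if n < 2 then [if n = 1 then '1' else '0']
    else binDigitsGo f (n / 2) ++ [if n % 2 = 1 then '1' else '0']

def binDigits (n : Nat) : List Char := binDigitsGo (n + 1) n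

-- truxor's for-loop: s ^= int(ran[-1]); ran = ran[:-1], 8 times.  The string always has
-- ≥ 8 characters '0'/'1' here (padded below), so ran[-1] never raises and int(·) is 0/1.
def truxorGo : Nat → Int → List Char → Int
  | 0, s, _ => s
  | i+1, s, cs =>
    truxorGo i (PySem.Int.bxor s (if cs.getLastD '0' = '1' then 1 else 0)) cs.dropLast

-- port of truxor; exact for ran ≥ 0 (the only values invsbox passes it).
def truxor (ran : Int) : Int :=
  let ds := binDigits ran.toNat
  let padded := if ds.length < 8 then List.replicate (8 - ds.length) '0' ++ ds else ds
  truxorGo 8 0 padded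

-- port of shift
def shiftKey (key : Int) : Int :=
  if PySem.Int.band key 1 ≠ 0 then
    PySem.Int.bxor (PySem.Int.floordiv key 2) 0x80
  else PySem.Int.floordiv key 2

-- lowercase hex digit character of n < 16, and the digit string of hex(n) (hex(0) = "0x0")
def hexDigitChar (n : Nat) : Char :=
  if n < 10 then Char.ofNat (48 + n) else Char.ofNat (87 + n)

-- the structural fuel n+1 always suffices (n / 16 < n)
def toHexDigitsGo : Nat → Nat → List Char
  | 0, _ => []
  | f+1, n =>
    if n < 16 then [hexDigitChar n]
    else toHexDigitsGo f (n / 16) ++ [hexDigitChar (n % 16)]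

def toHexDigits (n : Nat) : List Char := toHexDigitsGo (n + 1) n

-- int value of one lowercase hex digit; any other character yields 0 where Python's
-- int(·, 16) raises ValueError — exactly the inputs Pre_ excludes.
def hexVal (c : Char) : Int :=
  if 48 ≤ c.toNat ∧ c.toNat ≤ 57 then (c.toNat : Int) - 48
  else if 97 ≤ c.toNat ∧ c.toNat ≤ 102 then (c.toNat : Int) - 87
  else 0

-- invsbox's for-loop: s = str(truxor(bytebox & b)) + s; bytebox = shift(bytebox), 8 times.
def invsboxGo : Nat → Int → Int → List Char → List Char
  | 0, _, _, s => s
  | i+1, bytebox, b, s =>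
    invsboxGo i (shiftKey bytebox) b
      ((PySem.Int.toStr (truxor (PySem.Int.band bytebox b))).toList ++ s)

-- int(cs, 2) for a string of '0'/'1' characters (the only ones the loop produces).
def parseBin (cs : List Char) : Int :=
  cs.foldl (fun acc c => acc * 2 + (if c = '1' then 1 else 0)) 0

def invsbox (b : Int) : Int :=
  -- k = hex(b): "0x"/"-0x" followed by the lowercase hex digits of |b|
  let k : List Char :=
    if b < 0 then '-' :: '0' :: 'x' :: toHexDigits b.natAbs
    else '0' :: 'x' :: toHexDigits b.toNat
  let k2 := if k.length = 3 then k.take 2 ++ '0' :: [k.getLastD ' '] else k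
  let y := k2.getLastD ' '
  let x := k2.dropLast.getLastD ' '
  let b2 := hexVal y * 16 + hexVal x          -- int(y + x, 16)
  let s := invsboxGo 8 37 b2 []               -- bytebox = 0b00100101 = 37
  let temp := PySem.Int.bxor (parseBin s.reverse) 5
  gfInvert temp 27

-- ===== PORT B =====

-- gf_mul's while loop over (x, y, r); y < 256 here, so fuel 16 only makes it total.
def gfMulGo : Nat → Int → Int → Int → Int
  | 0, _, _, r => r
  | f+1, x, y, r =>
    if y ≠ 0 then
      let r' := if PySem.Int.band y 1 ≠ 0 then PySem.Int.bxor r x else r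
      let x' := x * 2
      let x'' := if PySem.Int.band x' 256 ≠ 0 then PySem.Int.bxor x' 0x11B else x'
      gfMulGo f x'' (PySem.Int.floordiv y 2) r'
    else r

def gfMul (x y : Int) : Int := gfMulGo 16 x y 0

-- gf_inv's for-loop: r = gf_mul(gf_mul(r, r), t) six times, then a final squaring (t^254).
def gfInvGo : Nat → Int → Int → Int
  | 0, _, r => gfMul r r
  | k+1, t, r => gfInvGo k t (gfMul (gfMul r r) t)

def gfInv (t : Int) : Int := gfInvGo 6 t t

def invsbox_alt (b : Int) : Int :=
  let c := PySem.Int.mod ((b.natAbs : Int)) 256   -- abs(b) % 256, so 0 ≤ c < 256 and shifts are exact powers of two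
  let t := PySem.Int.bxor
    (PySem.Int.band
      (PySem.Int.bxor
        (PySem.Int.bxor
          (PySem.Int.bor (c * 2) (PySem.Int.floordiv c 128))
          (PySem.Int.bor (c * 8) (PySem.Int.floordiv c 32)))
        (PySem.Int.bor (c * 64) (PySem.Int.floordiv c 4)))
      255)
    5
  gfInv t

-- ===== PRECONDITION & SPEC =====

-- Pre_ excludes exactly the inputs on which A does not return: -16 < b < 0, where hex(b)
-- is '-0x1'..'-0xf' and int(y + x, 16) raises ValueError on the character 'x', and
-- |b| % 256 = 99, where temp = 0 and gf_invert(0) loops forever.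
def Pre_invsbox (b : Int) : Prop := (b ≤ -16 ∨ 0 ≤ b) ∧ b.natAbs % 256 ≠ 99
instance (b : Int) : Decidable (Pre_invsbox b) := by unfold Pre_invsbox; infer_instance

def pvWitness_invsbox : Int := 7

def Spec_invsbox (b : Int) (out : Int) : Prop := out = invsbox_alt b
instance (b : Int) (out : Int) : Decidable (Spec_invsbox b out) := by unfold Spec_invsbox; infer_instance

-- ===== CLAIM (what is proved, stated in full; the proofs are below) =====
def Claim_equal_invsbox : Prop := ∀ (b : Int), Dom_invsbox b → Pre_invsbox b → Spec_invsbox b (invsbox b)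

-- ===== LEMMAS AND PROOFS =====

theorem toHexDigitsGo_ne_nil (f n : Nat) (h : 0 < f) : toHexDigitsGo f n ≠ [] := by
  cases f with
  | zero => omega
  | succ f => rw [toHexDigitsGo]; split <;> simp

theorem toHexDigitsGo_fuel (f : Nat) : ∀ f' n : Nat, n < f → n < f' →
    toHexDigitsGo f n = toHexDigitsGo f' n := by
  induction f with
  | zero => intro f' n h _; omega
  | succ f ih =>
    intro f' n h h'
    cases f' with
    | zero => omega
    | succ f' =>
      rw [toHexDigitsGo, toHexDigitsGo]
      by_cases h16 : n < 16
      · simp [h16]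
      · have hrec : n / 16 < n := Nat.div_lt_self (by omega) (by omega)
        simp only [if_neg h16]
        rw [ih f' (n / 16) (by omega) (by omega)]

theorem toHexDigits_getLastD (n : Nat) (c : Char) :
    (toHexDigits n).getLastD c = hexDigitChar (n % 16) := by
  rw [toHexDigits, toHexDigitsGo]
  split
  · next h => simp [Nat.mod_eq_of_lt h]
  · simp

theorem toHexDigits_dropLast (n : Nat) (h : 16 ≤ n) :
    (toHexDigits n).dropLast = toHexDigits (n / 16) := by
  rw [toHexDigits, toHexDigits, toHexDigitsGo, if_neg (by omega)]
  have hrec : n / 16 < n := Nat.div_lt_self (by omega) (by omega)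
  rw [List.dropLast_concat]
  exact toHexDigitsGo_fuel n (n / 16 + 1) (n / 16) (by omega) (by omega)

theorem toHexDigits_two_le (n : Nat) (h : 16 ≤ n) : 2 ≤ (toHexDigits n).length := by
  rw [toHexDigits, toHexDigitsGo, if_neg (by omega)]
  have := toHexDigitsGo_ne_nil n (n / 16) (by omega)
  rw [List.length_append]
  cases hh : toHexDigitsGo n (n / 16) with
  | nil => exact absurd hh this
  | cons a t => simp

theorem hexVal_hexDigitChar (d : Nat) (h : d < 16) : hexVal (hexDigitChar d) = d := by
  interval_cases d <;> decide

theorem hexDigits_ne_nil (m : Nat) : toHexDigits m ≠ [] := by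
  rw [toHexDigits]; exact toHexDigitsGo_ne_nil _ _ (by omega)

theorem cons_getLastD_hex (p q d : Char) (m : Nat) :
    (p :: q :: toHexDigits m).getLastD d = hexDigitChar (m % 16) := by
  rw [List.getLastD_cons, List.getLastD_cons, toHexDigits_getLastD]

theorem cons_dropLast_hex (p q : Char) (m : Nat) (h : 16 ≤ m) :
    (p :: q :: toHexDigits m).dropLast = p :: q :: toHexDigits (m / 16) := by
  obtain ⟨hd, tl, hl⟩ := List.exists_cons_of_ne_nil (hexDigits_ne_nil m)
  rw [← toHexDigits_dropLast m h, hl]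
  simp

theorem hexVal_pair (u v : Nat) (hu : u < 16) (hv : v < 16) :
    hexVal (hexDigitChar u) * 16 + hexVal (hexDigitChar v) = ((u * 16 + v : Nat) : Int) := by
  rw [hexVal_hexDigitChar u hu, hexVal_hexDigitChar v hv]
  push_cast
  ring

-- A's value at a nonnegative input, as a function of the two low hex digits of n
set_option maxRecDepth 100000 in
theorem invsbox_core (n : Nat) :
    invsbox (n : Int) =
      gfInvert (PySem.Int.bxor
        (parseBin ((invsboxGo 8 37 (((n % 16) * 16 + (n / 16) % 16 : Nat) : Int) []).reverse)) 5) 27 := by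
  by_cases h16 : n < 16
  · -- 16 literal cases: the padding branch (len(k) == 3)
    interval_cases n <;> decide
  · simp only [invsbox, Int.not_ofNat_neg, if_false, Int.toNat_natCast]
    have hlen : ('0' :: 'x' :: toHexDigits n).length ≠ 3 := by
      have := toHexDigits_two_le n (by omega)
      simp only [List.length_cons]
      omega
    rw [if_neg hlen, cons_getLastD_hex, cons_dropLast_hex _ _ _ (by omega),
      cons_getLastD_hex, hexVal_pair _ _ (by omega) (by omega)]

theorem cons3_getLastD_hex (p q r d : Char) (m : Nat) :
    (p :: q :: r :: toHexDigits m).getLastD d = hexDigitChar (m % 16) := by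
  rw [List.getLastD_cons, cons_getLastD_hex]

theorem cons3_dropLast_hex (p q r : Char) (m : Nat) (h : 16 ≤ m) :
    (p :: q :: r :: toHexDigits m).dropLast = p :: q :: r :: toHexDigits (m / 16) := by
  obtain ⟨hd, tl, hl⟩ := List.exists_cons_of_ne_nil (hexDigits_ne_nil m)
  rw [← toHexDigits_dropLast m h, hl]
  simp

theorem invsbox_neg_core (b : Int) (hb : b ≤ -16) :
    invsbox b = invsbox ((b.natAbs : Nat) : Int) := by
  have hn : 16 ≤ b.natAbs := by omega
  rw [invsbox_core b.natAbs]
  simp only [invsbox, if_pos (show b < 0 by omega)]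
  have hlen : ('-' :: '0' :: 'x' :: toHexDigits b.natAbs).length ≠ 3 := by
    have := toHexDigits_two_le b.natAbs hn
    simp only [List.length_cons]
    omega
  rw [if_neg hlen, cons3_getLastD_hex, cons3_dropLast_hex _ _ _ _ hn,
    cons3_getLastD_hex, hexVal_pair _ _ (by omega) (by omega)]

theorem invsbox_alt_mod (n : Nat) :
    invsbox_alt (n : Int) = invsbox_alt ((n % 256 : Nat) : Int) := by
  have h1 : PySem.Int.mod ((n : Int)) 256 = ((n % 256 : Nat) : Int) := by
    exact_mod_cast PySem.Int.mod_natCast n 256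
  have h2 : PySem.Int.mod (((n % 256 : Nat) : Int)) 256 = ((n % 256 : Nat) : Int) := by
    have h := PySem.Int.mod_natCast (n % 256) 256
    have h3 : n % 256 % 256 = n % 256 := by omega
    exact_mod_cast h3 ▸ h
  simp only [invsbox_alt, Int.natAbs_natCast, h1, h2]

theorem invsbox_mod (n : Nat) : invsbox (n : Int) = invsbox ((n % 256 : Nat) : Int) := by
  rw [invsbox_core n, invsbox_core (n % 256)]
  have h1 : n % 256 % 16 = n % 16 := by omega
  have h2 : n % 256 / 16 % 16 = n / 16 % 16 := by omega
  rw [h1, h2]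

set_option maxRecDepth 1000000 in
set_option maxHeartbeats 4000000 in
theorem invsbox_key : ∀ r : Fin 256, r.val ≠ 99 → invsbox (r.val : Int) = invsbox_alt (r.val : Int) := by
  decide

-- ===== VERDICT (by name: the statement is the Claim_ definition above) =====
theorem invsbox_spec : Claim_equal_invsbox := by
  intro b _ hpre
  unfold Spec_invsbox
  obtain ⟨hsign, hmod⟩ := hpre
  have step : ∀ n : Nat, n % 256 ≠ 99 → invsbox (n : Int) = invsbox_alt (n : Int) := by
    intro n hn
    rw [invsbox_mod n, invsbox_alt_mod n]
    exact invsbox_key ⟨n % 256, Nat.mod_lt _ (by omega)⟩ hn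
  rcases hsign with hneg | hpos
  · have habs : invsbox_alt b = invsbox_alt ((b.natAbs : Nat) : Int) := by
      unfold invsbox_alt
      simp
    rw [invsbox_neg_core b hneg, habs]
    exact step b.natAbs hmod
  · have hb : b = ((b.toNat : Nat) : Int) := (Int.toNat_of_nonneg hpos).symm
    rw [hb]
    exact step b.toNat (by omega)
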